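-- pv_equiv track=rewrite | github.com/256aidev/Projects | 256ai-projects/bazi/iOS/AstrologyApp/engines/relationship_engine.py | check_deep_green_conditions
-- ===== SOURCE A (Python) =====
-- from typing import Dict, List, Tuple, Optional, Any
--
-- POSITIVE_TEN_GODS = {
--     "spouse": ["DirectWealth", "IndirectWealth", "EatingGod", "DirectResource", "DirectOfficer"],
--     "parent": ["DirectResource", "IndirectResource", "EatingGod"],
--     "child": ["EatingGod", "HurtingOfficer", "Friend"],
--     "sibling": ["Friend", "EatingGod", "DirectResource"],
--     "friend": ["Friend", "EatingGod", "HurtingOfficer"],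
--     "other": ["Friend", "EatingGod", "DirectResource"]
-- }
--
-- def check_deep_green_conditions(
--     events: List[Dict],
--     ten_god_role: str,
--     relationship_type: str,
--     confidence_percent: int
-- ) -> Tuple[bool, int]:
--     """
--     Check deep green gate conditions. Requires 2 of 5 to pass.
--
--     Conditions:
--     1. Day branch relationship is COMBINE or TRINE
--     2. Day stem interaction is GENERATING (productive flow)
--     3. Ten-God is positive for relationship type
--     4. No CLASH on day palace
--     5. Confidence >= 85%
--
--     Returns: (eligible, conditions_met_count)
--     """
--     conditions_met = 0
--
--     # Condition 1: Day branch COMBINE or TRINE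
--     day_branch_harmony = any(
--         e.get("palace") == "day_branch" and e.get("type") in ["COMBINE", "TRINE"]
--         for e in events
--     )
--     if day_branch_harmony:
--         conditions_met += 1
--
--     # Condition 2: Day stem GENERATING
--     stem_generating = any(
--         e.get("palace") == "day_stem" and e.get("type") in ["STEM_GENERATING", "STEM_BEING_GENERATED", "GENERATING", "BEING_GENERATED"]
--         for e in events
--     )
--     if stem_generating:
--         conditions_met += 1
--
--     # Condition 3: Positive Ten-God for relationship type
--     positive_gods = POSITIVE_TEN_GODS.get(relationship_type, POSITIVE_TEN_GODS["other"])
--     if ten_god_role in positive_gods: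
--         conditions_met += 1
--
--     # Condition 4: No CLASH on day palace
--     has_day_clash = any(
--         e.get("palace") == "day_branch" and e.get("type") == "CLASH"
--         for e in events
--     )
--     if not has_day_clash:
--         conditions_met += 1
--
--     # Condition 5: Confidence >= 85%
--     if confidence_percent >= 85:
--         conditions_met += 1
--
--     # Need 2 of 5 conditions
--     eligible = conditions_met >= 2
--
--     return eligible, conditions_met
-- ===== SOURCE B (Python) =====
-- POSITIVE_TEN_GODS = {
--     "spouse": ["DirectWealth", "IndirectWealth", "EatingGod", "DirectResource", "DirectOfficer"],
--     "parent": ["DirectResource", "IndirectResource", "EatingGod"],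
--     "child": ["EatingGod", "HurtingOfficer", "Friend"],
--     "sibling": ["Friend", "EatingGod", "DirectResource"],
--     "friend": ["Friend", "EatingGod", "HurtingOfficer"],
--     "other": ["Friend", "EatingGod", "DirectResource"]
-- }
--
-- def check_deep_green_conditions(events, ten_god_role, relationship_type, confidence_percent):
--     # One fused pass over events instead of three separate any() scans.
--     day_branch_harmony = False
--     stem_generating = False
--     has_day_clash = False
--     for e in events:
--         palace = e.get("palace")
--         etype = e.get("type")
--         if palace == "day_branch" and etype in ["COMBINE", "TRINE"]:
--             day_branch_harmony = True
--         if palace == "day_stem" and etype in ["STEM_GENERATING", "STEM_BEING_GENERATED", "GENERATING", "BEING_GENERATED"]: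
--             stem_generating = True
--         if palace == "day_branch" and etype == "CLASH":
--             has_day_clash = True
--     conditions_met = 0
--     if day_branch_harmony:
--         conditions_met += 1
--     if stem_generating:
--         conditions_met += 1
--     if ten_god_role in POSITIVE_TEN_GODS.get(relationship_type, POSITIVE_TEN_GODS["other"]):
--         conditions_met += 1
--     if not has_day_clash:
--         conditions_met += 1
--     if confidence_percent >= 85:
--         conditions_met += 1
--     return conditions_met >= 2, conditions_met
-- ===== Notes on version B (the rewrite author's own statement) =====
-- stated objective: alternative
-- what changed: B replaces A's three separate any() scans over events with a single fused pass maintaining three boolean flags, then does the same condition arithmetic.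
import Mathlib
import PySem

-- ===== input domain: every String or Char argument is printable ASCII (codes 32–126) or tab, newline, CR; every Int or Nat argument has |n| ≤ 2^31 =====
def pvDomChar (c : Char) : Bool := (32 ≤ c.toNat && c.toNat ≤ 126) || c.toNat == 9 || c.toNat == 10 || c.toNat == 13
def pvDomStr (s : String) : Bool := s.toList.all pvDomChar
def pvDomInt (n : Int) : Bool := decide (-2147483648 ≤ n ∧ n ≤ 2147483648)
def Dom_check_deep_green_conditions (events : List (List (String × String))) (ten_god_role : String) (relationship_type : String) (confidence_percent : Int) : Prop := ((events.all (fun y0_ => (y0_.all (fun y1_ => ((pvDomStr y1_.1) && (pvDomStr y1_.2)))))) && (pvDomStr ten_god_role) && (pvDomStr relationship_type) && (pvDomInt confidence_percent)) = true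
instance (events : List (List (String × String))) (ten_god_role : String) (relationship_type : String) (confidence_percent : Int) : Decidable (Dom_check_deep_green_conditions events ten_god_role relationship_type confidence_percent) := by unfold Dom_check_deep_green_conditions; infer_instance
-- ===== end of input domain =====

-- B fuses A's three any() scans over events into one pass with three boolean flags; same arithmetic after.
-- ===== PORT A =====
-- e.get(k) on a dict ported as first-match lookup in the association list
def pvGet (e : List (String × String)) (k : String) : Option String :=
  (e.find? (fun p => p.1 == k)).map (·.2)

def pvIsHarmony (e : List (String × String)) : Bool :=
  pvGet e "palace" == some "day_branch" &&
    (pvGet e "type" == some "COMBINE" || pvGet e "type" == some "TRINE")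

def pvIsStemGen (e : List (String × String)) : Bool :=
  pvGet e "palace" == some "day_stem" &&
    (pvGet e "type" == some "STEM_GENERATING" || pvGet e "type" == some "STEM_BEING_GENERATED" ||
     pvGet e "type" == some "GENERATING" || pvGet e "type" == some "BEING_GENERATED")

def pvIsClash (e : List (String × String)) : Bool :=
  pvGet e "palace" == some "day_branch" && pvGet e "type" == some "CLASH"

def POSITIVE_TEN_GODS : PySem.Dict String (List String) :=
  PySem.Dict.ofList [
    ("spouse", ["DirectWealth", "IndirectWealth", "EatingGod", "DirectResource", "DirectOfficer"]),
    ("parent", ["DirectResource", "IndirectResource", "EatingGod"]),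
    ("child", ["EatingGod", "HurtingOfficer", "Friend"]),
    ("sibling", ["Friend", "EatingGod", "DirectResource"]),
    ("friend", ["Friend", "EatingGod", "HurtingOfficer"]),
    ("other", ["Friend", "EatingGod", "DirectResource"])]

def check_deep_green_conditions (events : List (List (String × String))) (ten_god_role : String) (relationship_type : String) (confidence_percent : Int) : Bool × Int :=
  let conditions_met : Int := 0
  let day_branch_harmony := events.any pvIsHarmony
  let conditions_met := if day_branch_harmony then conditions_met + 1 else conditions_met
  let stem_generating := events.any pvIsStemGen
  let conditions_met := if stem_generating then conditions_met + 1 else conditions_met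
  let positive_gods := POSITIVE_TEN_GODS.getD relationship_type (POSITIVE_TEN_GODS.getD "other" [])
  let conditions_met := if positive_gods.contains ten_god_role then conditions_met + 1 else conditions_met
  let has_day_clash := events.any pvIsClash
  let conditions_met := if !has_day_clash then conditions_met + 1 else conditions_met
  let conditions_met := if confidence_percent ≥ 85 then conditions_met + 1 else conditions_met
  let eligible := conditions_met ≥ 2
  (eligible, conditions_met)

-- ===== PORT B =====
-- single fused pass: three flags updated per event (mirrors the for-loop in Source B)
def pvStep (f : Bool × Bool × Bool) (e : List (String × String)) : Bool × Bool × Bool :=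
  let f1 := if pvIsHarmony e then true else f.1
  let f2 := if pvIsStemGen e then true else f.2.1
  let f3 := if pvIsClash e then true else f.2.2
  (f1, f2, f3)

def check_deep_green_conditions_alt (events : List (List (String × String))) (ten_god_role : String) (relationship_type : String) (confidence_percent : Int) : Bool × Int :=
  let flags := events.foldl pvStep (false, false, false)
  let day_branch_harmony := flags.1
  let stem_generating := flags.2.1
  let has_day_clash := flags.2.2
  let conditions_met : Int := 0
  let conditions_met := if day_branch_harmony then conditions_met + 1 else conditions_met
  let conditions_met := if stem_generating then conditions_met + 1 else conditions_met
  let conditions_met := if (POSITIVE_TEN_GODS.getD relationship_type (POSITIVE_TEN_GODS.getD "other" [])).contains ten_god_role then conditions_met + 1 else conditions_met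
  let conditions_met := if !has_day_clash then conditions_met + 1 else conditions_met
  let conditions_met := if confidence_percent ≥ 85 then conditions_met + 1 else conditions_met
  (conditions_met ≥ 2, conditions_met)

-- ===== PRECONDITION & SPEC =====
def Spec_check_deep_green_conditions (events : List (List (String × String))) (ten_god_role : String) (relationship_type : String) (confidence_percent : Int) (out : Bool × Int) : Prop := out = check_deep_green_conditions_alt events ten_god_role relationship_type confidence_percent
instance (events : List (List (String × String))) (ten_god_role : String) (relationship_type : String) (confidence_percent : Int) (out : Bool × Int) : Decidable (Spec_check_deep_green_conditions events ten_god_role relationship_type confidence_percent out) := by unfold Spec_check_deep_green_conditions; infer_instance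

-- ===== CLAIM (what is proved, stated in full; the proofs are below) =====
def Claim_equal_check_deep_green_conditions : Prop := ∀ (events : List (List (String × String))) (ten_god_role : String) (relationship_type : String) (confidence_percent : Int), Dom_check_deep_green_conditions events ten_god_role relationship_type confidence_percent → Spec_check_deep_green_conditions events ten_god_role relationship_type confidence_percent (check_deep_green_conditions events ten_god_role relationship_type confidence_percent)

-- ===== LEMMAS AND PROOFS =====
theorem pvStep_foldl (events : List (List (String × String))) (f : Bool × Bool × Bool) :
    events.foldl pvStep f =
      (f.1 || events.any pvIsHarmony, f.2.1 || events.any pvIsStemGen, f.2.2 || events.any pvIsClash) := by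
  induction events generalizing f with
  | nil => simp
  | cons e rest ih =>
    simp only [List.foldl_cons, List.any_cons, ih]
    simp [pvStep]
    constructor
    · cases pvIsHarmony e <;> simp
    constructor
    · cases pvIsStemGen e <;> simp
    · cases pvIsClash e <;> simp

-- ===== VERDICT (by name: the statement is the Claim_ definition above) =====
theorem check_deep_green_conditions_spec : Claim_equal_check_deep_green_conditions := by
  intro events tgr rt cp _
  unfold Spec_check_deep_green_conditions check_deep_green_conditions check_deep_green_conditions_alt
  simp only [pvStep_foldl, Bool.false_or]
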